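-- pv_equiv track=rewrite | github.com/Farmer-from-Space/coding_test | programmers/138476.py | solution
-- ===== SOURCE A (Python) =====
-- import collections
--
-- def solution(k, t):
--
--     counter = collections.Counter(t)
--
--     for i,(_,v) in enumerate(sorted(counter.items(), key=lambda x: x[1], reverse=True)):
--         k -= v
--         if k <= 0:
--             answer = i+1
--             break
--     return answer
-- ===== SOURCE B (Python) =====
-- import collections
--
-- def solution(k, t):
--     counter = collections.Counter(t)
--     types = 0
--     if counter:
--         buckets = [0] * (max(counter.values()) + 1)
--         for v in counter.values():
--             buckets[v] += 1
--         for c in range(len(buckets) - 1, 0, -1):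
--             for _ in range(buckets[c]):
--                 k -= c
--                 types += 1
--                 if k <= 0:
--                     return types
--     return types
-- ===== Notes on version B (the rewrite author's own statement) =====
-- stated objective: alternative
-- what changed: Replaces A's sort of the counter items by a bucket histogram indexed by frequency, walked from the highest count down to 1 with an early return; no sorting is performed.
import Mathlib
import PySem

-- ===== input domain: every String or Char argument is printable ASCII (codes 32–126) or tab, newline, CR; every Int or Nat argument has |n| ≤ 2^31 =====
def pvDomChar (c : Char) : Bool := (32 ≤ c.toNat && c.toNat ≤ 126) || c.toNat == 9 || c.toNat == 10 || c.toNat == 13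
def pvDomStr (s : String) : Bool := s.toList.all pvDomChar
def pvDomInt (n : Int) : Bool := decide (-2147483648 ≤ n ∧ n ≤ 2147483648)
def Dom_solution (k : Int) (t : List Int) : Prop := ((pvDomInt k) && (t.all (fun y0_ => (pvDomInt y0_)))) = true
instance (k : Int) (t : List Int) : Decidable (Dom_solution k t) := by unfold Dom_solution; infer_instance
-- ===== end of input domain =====

-- B replaces A's sort of the counter by a bucket histogram over frequencies walked from the
-- highest count down (alternative algorithm; equal return value wherever A returns).

-- ===== PORT A =====
-- A's for-loop with break over enumerate(sorted(counter.items(), key=value, reverse=True));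
-- 'none' marks A's fall-through, where Python raises UnboundLocalError (outside Pre_).
def solutionLoop (k : Int) : List (Int × (Int × Int)) → Option Int
  | [] => none
  | (i, (_, v)) :: rest =>
      let k' := k - v
      if k' ≤ 0 then some (i + 1) else solutionLoop k' rest

def solution (k : Int) (t : List Int) : Int :=
  let counter := PySem.Dict.counter t
  (solutionLoop k (PySem.List.enumerate (PySem.List.sorted counter.items (fun x => x.2) true) 0)).getD 0

-- ===== PORT B =====
-- inner 'for _ in range(buckets[c])': returns (early-return value, k, types)
def solutionAltInner (c : Int) : Nat → Int → Int → Option Int × Int × Int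
  | 0, k, types => (none, k, types)
  | n + 1, k, types =>
      let k' := k - c
      let types' := types + 1
      if k' ≤ 0 then (some types', k', types') else solutionAltInner c n k' types'

-- outer 'for c in range(len(buckets)-1, 0, -1)': returns (early-return value, final types)
def solutionAltOuter (buckets : List Int) : List Int → Int → Int → Option Int × Int
  | [], _, types => (none, types)
  | c :: cs, k, types =>
      match solutionAltInner c (PySem.List.pyGetD buckets c 0).toNat k types with
      | (some ans, _, _) => (some ans, types)
      | (none, k', types') => solutionAltOuter buckets cs k' types'

def solution_alt (k : Int) (t : List Int) : Int :=
  let counter := PySem.Dict.counter t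
  let types : Int := 0
  if counter.items.isEmpty then types
  else
    let vals := counter.values
    let m := (PySem.List.max? vals (fun v => v)).getD 0
    let buckets := vals.foldl (fun b v => PySem.List.pySetD b v (PySem.List.pyGetD b v 0 + 1))
      (List.replicate (m + 1).toNat 0)
    match solutionAltOuter buckets (PySem.List.pyRange ((buckets.length : Int) - 1) 0 (-1)) k types with
    | (some ans, _) => ans
    | (none, types') => types'

-- ===== PRECONDITION & SPEC =====
-- A raises UnboundLocalError when t is empty or when the total number of tangerines is < k
-- (the loop then ends without assigning 'answer'); Pre_ excludes exactly those inputs.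
def Pre_solution (k : Int) (t : List Int) : Prop := t ≠ [] ∧ k ≤ (t.length : Int)
instance (k : Int) (t : List Int) : Decidable (Pre_solution k t) := by unfold Pre_solution; infer_instance
def pvWitness_solution : Int × List Int := (2, [1, 1, 2])

def Spec_solution (k : Int) (t : List Int) (out : Int) : Prop := out = solution_alt k t
instance (k : Int) (t : List Int) (out : Int) : Decidable (Spec_solution k t out) := by unfold Spec_solution; infer_instance

-- ===== CLAIM (what is proved, stated in full; the proofs are below) =====
def Claim_equal_solution : Prop := ∀ (k : Int) (t : List Int), Dom_solution k t → Pre_solution k t → Spec_solution k t (solution k t)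

-- ===== LEMMAS AND PROOFS =====

-- the common abstract scan: consume counts left to right, return (early-return value, k, types)
def gScan : Int → Int → List Int → Option Int × Int × Int
  | k, types, [] => (none, k, types)
  | k, types, v :: rest =>
      if k - v ≤ 0 then (some (types + 1), k - v, types + 1)
      else gScan (k - v) (types + 1) rest

-- A's loop is the scan over the values of the enumerated list
lemma solutionLoop_eq_gScan (l : List (Int × Int)) : ∀ (k s : Int),
    solutionLoop k (PySem.List.enumerate l s) = (gScan k s (l.map (·.2))).1 := by
  induction l with
  | nil => intro k s; simp [PySem.List.enumerate_nil, solutionLoop, gScan]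
  | cons x rest ih =>
      intro k s
      simp only [PySem.List.enumerate_cons, List.map, solutionLoop, gScan]
      split_ifs with h
      · rfl
      · exact ih (k - x.2) (s + 1)

-- B's inner loop is the scan over replicate
lemma solutionAltInner_eq_gScan (c : Int) : ∀ (n : Nat) (k types : Int),
    solutionAltInner c n k types = gScan k types (List.replicate n c) := by
  intro n
  induction n with
  | zero => intro k types; simp [solutionAltInner, gScan]
  | succ n ih =>
      intro k types
      simp only [List.replicate, solutionAltInner, gScan]
      split_ifs with h
      · rfl
      · exact ih (k - c) (types + 1)

lemma gScan_append (xs : List Int) : ∀ (ys : List Int) (k ty : Int),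
    gScan k ty (xs ++ ys) =
      match gScan k ty xs with
      | (some a, k', ty') => (some a, k', ty')
      | (none, k', ty') => gScan k' ty' ys := by
  induction xs with
  | nil => intro ys k ty; simp [gScan]
  | cons v rest ih =>
      intro ys k ty
      simp only [List.cons_append, gScan]
      split_ifs with h
      · rfl
      · exact ih ys (k - v) (ty + 1)

-- B's outer loop, read off as a value, is the scan over the bucket expansion
lemma solutionAltOuter_val (buckets : List Int) : ∀ (cs : List Int) (k types : Int),
    (solutionAltOuter buckets cs k types).1.getD (solutionAltOuter buckets cs k types).2
      = (gScan k types (cs.flatMap (fun c => List.replicate (PySem.List.pyGetD buckets c 0).toNat c))).1.getD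
          (gScan k types (cs.flatMap (fun c => List.replicate (PySem.List.pyGetD buckets c 0).toNat c))).2.2 := by
  intro cs
  induction cs with
  | nil => intro k types; simp [solutionAltOuter, gScan]
  | cons c cs ih =>
      intro k types
      simp only [List.flatMap_cons, solutionAltOuter, solutionAltInner_eq_gScan,
        gScan_append]
      rcases hg : gScan k types (List.replicate (PySem.List.pyGetD buckets c 0).toNat c) with ⟨r, k', ty'⟩
      cases r with
      | some a => simp
      | none => simpa using ih k' ty'

-- the scan returns early whenever the total is at least k
lemma gScan_isSome : ∀ (vs : List Int) (k types : Int), vs ≠ [] → k ≤ vs.sum →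
    (gScan k types vs).1.isSome := by
  intro vs
  induction vs with
  | nil => intro _ _ h; exact absurd rfl h
  | cons v rest ih =>
      intro k types _ hk
      simp only [gScan]
      split_ifs with h
      · rfl
      · rcases rest with _ | ⟨w, ws⟩
        · simp at hk; omega
        · exact ih (k - v) (types + 1) (by simp) (by simp at hk ⊢; omega)

-- buckets after the counting fold: entry c holds its start value plus the number of occurrences of c
lemma buckets_length (vs : List Int) : ∀ (b : List Int),
    (vs.foldl (fun b v => PySem.List.pySetD b v (PySem.List.pyGetD b v 0 + 1)) b).length = b.length := by
  induction vs with
  | nil => intro b; rfl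
  | cons v rest ih => intro b; rw [List.foldl_cons, ih, PySem.List.length_pySetD]

lemma buckets_count (vs : List Int) : ∀ (b : List Int), (∀ v ∈ vs, 0 ≤ v ∧ v < (b.length : Int)) →
    ∀ (c : Int), 0 ≤ c →
    PySem.List.pyGetD (vs.foldl (fun b v => PySem.List.pySetD b v (PySem.List.pyGetD b v 0 + 1)) b) c 0
      = PySem.List.pyGetD b c 0 + vs.count c := by
  induction vs with
  | nil => intro b _ c _; simp
  | cons v rest ih =>
      intro b hb c hc
      have hv := hb v (List.mem_cons_self ..)
      have hlen : (PySem.List.pySetD b v (PySem.List.pyGetD b v 0 + 1)).length = b.length :=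
        PySem.List.length_pySetD ..
      rw [List.foldl_cons, ih _ (fun w hw => by rw [hlen]; exact hb w (List.mem_cons_of_mem _ hw)) c hc]
      rw [PySem.List.pySetD_of_nonneg b _ hv.1, PySem.List.pyGetD_of_nonneg _ _ hc,
        PySem.List.pyGetD_of_nonneg _ _ hc, List.getD_eq_getElem?_getD, List.getD_eq_getElem?_getD,
        List.getElem?_set]
      by_cases hcv : c = v
      · subst hcv
        have hlt : c.toNat < b.length := by omega
        simp [hlt, PySem.List.pyGetD_of_nonneg _ _ hv.1, List.getD_eq_getElem?_getD]
        omega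
      · have hne : v.toNat ≠ c.toNat := by omega
        simp [hne, Ne.symm hcv]

-- counting in a flatMap of replicates over a duplicate-free list of bucket indices
lemma count_flatMap_replicate (n : Int → Nat) : ∀ (cs : List Int), cs.Nodup → ∀ (x : Int),
    (cs.flatMap (fun c => List.replicate (n c) c)).count x = if x ∈ cs then n x else 0 := by
  intro cs
  induction cs with
  | nil => intro _ x; simp
  | cons c cs ih =>
      intro hnd x
      rw [List.flatMap_cons, List.count_append, ih hnd.of_cons x, List.count_replicate]
      by_cases hxc : x = c
      · subst hxc
        simp only [List.nodup_cons] at hnd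
        simp [hnd.1]
      · simp [hxc, Ne.symm hxc]

-- the expansion of a weakly decreasing bucket-index list is weakly decreasing
lemma pairwise_flatMap_replicate (n : Int → Nat) : ∀ (cs : List Int),
    cs.Pairwise (fun a b => b ≤ a) →
    (cs.flatMap (fun c => List.replicate (n c) c)).Pairwise (fun a b => b ≤ a) := by
  intro cs
  induction cs with
  | nil => intro _; simp
  | cons c cs ih =>
      intro hp
      rw [List.flatMap_cons]
      rw [List.pairwise_cons] at hp
      refine List.pairwise_append.2 ⟨?_, ih hp.2, ?_⟩
      · exact List.pairwise_replicate.2 (Or.inr le_rfl)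
      · intro a ha b hb
        rw [List.eq_of_mem_replicate ha]
        rcases List.mem_flatMap.1 hb with ⟨c', hc', hb'⟩
        rw [List.eq_of_mem_replicate hb']
        exact hp.1 c' hc'

-- the values of Counter(t), as counts over the ordered set of t's elements
lemma counter_values (t : List Int) :
    (PySem.Dict.counter t).values = (PySem.Set.ofList t).map (fun x => (t.count x : Int)) := by
  simp [PySem.Dict.values, PySem.Dict.items_counter, List.map_map]

lemma ofList_perm_dedup (t : List Int) : (PySem.Set.ofList t).Perm t.dedup :=
  (List.perm_ext_iff_of_nodup (PySem.Set.nodup_ofList t) t.nodup_dedup).2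
    (by simp [PySem.Set.mem_ofList, List.mem_dedup])

-- the counter's values sum to the length of t
lemma counter_values_sum (t : List Int) : (PySem.Dict.counter t).values.sum = (t.length : Int) := by
  rw [counter_values, ((ofList_perm_dedup t).map _).sum_eq, ← List.sum_map_count_dedup_eq_length t]
  push_cast [List.map_map]
  rfl

lemma getD_replicate_zero (n : Nat) (c : Int) (hc : 0 ≤ c) :
    PySem.List.pyGetD (List.replicate n (0 : Int)) c 0 = 0 := by
  rw [PySem.List.pyGetD_of_nonneg _ _ hc]
  simp [List.getD_eq_getElem?_getD, List.getElem?_replicate]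
  split <;> rfl

-- a match on (Option × β) read as getD
lemma match_getD (r : Option Int × Int) :
    (match r with | (some a, _) => a | (none, ty) => ty) = r.1.getD r.2 := by
  rcases r with ⟨_ | a, ty⟩ <;> rfl

lemma solution_eq_alt (k : Int) (t : List Int) (hpre : Pre_solution k t) :
    solution k t = solution_alt k t := by
  obtain ⟨hne, hk⟩ := hpre
  obtain ⟨a0, ha0⟩ := List.exists_mem_of_ne_nil t hne
  have hvals := counter_values t
  set vals := (PySem.Dict.counter t).values with hv
  have ha0v : ((t.count a0 : Int)) ∈ vals := by
    rw [hvals]; exact List.mem_map_of_mem ((PySem.Set.mem_ofList ..).2 ha0)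
  have hvals_ne : vals ≠ [] := List.ne_nil_of_mem ha0v
  -- the maximum count
  set m := (PySem.List.max? vals (fun v => v)).getD 0 with hm
  have hmax : PySem.List.max? vals (fun v => v) = some m := by
    cases h : PySem.List.max? vals (fun v => v) with
    | none => exact absurd ((PySem.List.max?_eq_none_iff ..).1 h) hvals_ne
    | some x => rw [hm, h]; rfl
  have hvm : ∀ v ∈ vals, v ≤ m := PySem.List.max?_isMax hmax
  have hv1 : ∀ v ∈ vals, 1 ≤ v := by
    intro v hvv
    rw [hvals] at hvv
    rcases List.mem_map.1 hvv with ⟨x, hx, rfl⟩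
    have : x ∈ t := (PySem.Set.mem_ofList ..).1 hx
    have : 0 < t.count x := List.count_pos_iff.2 this
    omega
  have hm1 : 1 ≤ m := hv1 m (PySem.List.max?_mem hmax)
  -- buckets
  set b0 : List Int := List.replicate (m + 1).toNat 0 with hb0
  have hb0len : (b0.length : Int) = m + 1 := by
    rw [hb0, List.length_replicate]; omega
  set buckets := vals.foldl (fun b v => PySem.List.pySetD b v (PySem.List.pyGetD b v 0 + 1)) b0 with hbk
  have hblen : (buckets.length : Int) = m + 1 := by rw [hbk, buckets_length, hb0len]
  have hvsb : ∀ v ∈ vals, 0 ≤ v ∧ v < (b0.length : Int) := by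
    intro v hvv
    have := hv1 v hvv; have := hvm v hvv
    constructor <;> omega
  have hbc : ∀ c : Int, 0 ≤ c → PySem.List.pyGetD buckets c 0 = (vals.count c : Int) := by
    intro c hc
    rw [hbk, buckets_count vals b0 hvsb c hc, hb0, getD_replicate_zero _ _ hc, zero_add]
  -- the countdown of bucket indices and its expansion
  set cs := PySem.List.pyRange ((buckets.length : Int) - 1) 0 (-1) with hcs
  have hcseq : cs = PySem.List.pyRange m 0 (-1) := by rw [hcs, hblen]; norm_num
  have hcs_mem : ∀ x : Int, x ∈ cs ↔ 0 < x ∧ x ≤ m := by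
    intro x; rw [hcseq]; exact PySem.List.mem_pyRange_neg_one
  have hcs_nodup : cs.Nodup := by
    rw [hcseq, PySem.List.pyRange_neg_one_eq_reverse]
    exact (List.nodup_reverse).2 (PySem.List.nodup_pyRange_one ..)
  have hcs_pw : cs.Pairwise (fun a b => b ≤ a) := by
    rw [hcseq, PySem.List.pyRange_neg_one_eq_reverse]
    exact (List.pairwise_reverse).2 ((PySem.List.pairwise_lt_pyRange_one ..).imp le_of_lt)
  set E := cs.flatMap (fun c => List.replicate (PySem.List.pyGetD buckets c 0).toNat c) with hE
  have hE_count : ∀ x : Int, E.count x = vals.count x := by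
    intro x
    rw [hE, count_flatMap_replicate _ cs hcs_nodup x]
    by_cases hx : x ∈ cs
    · rw [if_pos hx, hbc x (le_of_lt ((hcs_mem x).1 hx).1)]
      exact Int.toNat_natCast _
    · rw [if_neg hx, eq_comm, List.count_eq_zero]
      intro hxv
      exact hx ((hcs_mem x).2 ⟨by have := hv1 x hxv; omega, hvm x hxv⟩)
  have hE_perm : E.Perm vals := List.perm_iff_count.2 (by intro x; rw [List.count_eq_countP, List.count_eq_countP]; exact_mod_cast hE_count x)
  have hE_pw : E.Pairwise (fun a b => b ≤ a) := pairwise_flatMap_replicate _ cs hcs_pw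
  -- A's sorted value list
  set As := (PySem.List.sorted (PySem.Dict.counter t).items (fun x => x.2) true).map (fun x => x.2) with hA
  have hA_perm : As.Perm vals := (PySem.List.sorted_perm ..).map _
  have hA_pw : As.Pairwise (fun a b : Int => b ≤ a) :=
    (List.pairwise_map).2 (PySem.List.sorted_pairwise_rev ..)
  have hAE : As = E :=
    List.Perm.eq_of_pairwise (fun a b _ _ h1 h2 => le_antisymm h2 h1) hA_pw hE_pw
      (hA_perm.trans hE_perm.symm)
  -- the scan succeeds under Pre_
  have hAs_ne : As ≠ [] := fun h => hvals_ne (hA_perm.symm.trans (h ▸ List.Perm.refl _)).eq_nil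
  have hsum : As.sum = (t.length : Int) := by rw [hA_perm.sum_eq, hv, counter_values_sum]
  have hsome := gScan_isSome As k 0 hAs_ne (by rw [hsum]; exact hk)
  obtain ⟨ans, hans⟩ := Option.isSome_iff_exists.1 hsome
  -- both sides compute the scan over the same list
  have hitems_ne : ((PySem.Dict.counter t).items.isEmpty) = false := by
    rw [List.isEmpty_eq_false_iff_exists_mem]
    have : vals ≠ [] := hvals_ne
    rw [hv] at this
    rcases List.exists_mem_of_ne_nil _ (fun h : (PySem.Dict.counter t).items = [] => this (by simp [PySem.Dict.values, h])) with ⟨p, hp⟩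
    exact ⟨p, hp⟩
  have hAval : solution k t = ((gScan k 0 As).1.getD 0) := by
    rw [solution, solutionLoop_eq_gScan]
  have hBval : solution_alt k t = ((gScan k 0 E).1.getD ((gScan k 0 E).2.2)) := by
    simp only [solution_alt, hitems_ne, Bool.false_eq_true, if_false]
    rw [← hv, ← hm, ← hb0, ← hbk, ← hcs, match_getD, solutionAltOuter_val, ← hE]
  rw [hAval, hBval, ← hAE, hans]
  rfl

-- ===== VERDICT (by name: the statement is the Claim_ definition above) =====
theorem solution_spec : Claim_equal_solution := by
  intro k t _ hpre
  unfold Spec_solution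
  exact solution_eq_alt k t hpre
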